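-- pv_equiv track=rewrite | github.com/InternScience/CrystalX | training_code/crystalx_train/common/utils.py | sfac_purturb
-- ===== SOURCE A (Python) =====
-- from itertools import combinations, permutations, product
--
-- def sfac_purturb(y):
--     sfac = {}
--     sfac[6] = 0
--     sfac[7] = 0
--     sfac[8] = 0
--     for item in y:
--         if item not in sfac.keys():
--             sfac[item] = 0
--         sfac[item] += 1
--     ny = []
--     sy = []
--     for k in sorted(sfac.keys(), reverse = True):
--         if k > 8:
--             ny += [k] * sfac[k]
--         if k < 6:
--             sy += [k] * sfac[k]
--     all_y = []
--     nums = [-2,-1,0,1,2]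
--     # nums = [0]
--     perms = product(nums, repeat=3)
--     for perm in perms:
--         ky = []
--         if sum(perm) == 0:
--             c = perm[0] + sfac[6]
--             n = perm[1] + sfac[7]
--             o = perm[2] + sfac[8]
--             if c > -1 and n > -1 and o > -1:
--                 ky += [8] * o
--                 ky += [7] * n
--                 ky += [6] * c
--                 all_y.append(ny + ky + sy)
--     return all_y
-- ===== SOURCE B (Python) =====
-- def sfac_purturb(y):
--     # B: recursive distributor — build the middle segments by recursing over the
--     # (element, count) pairs, choosing an offset in [-2..2] at each level; the
--     # base case keeps only branches whose offsets sum to zero (objective: alternative).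
--     ny = sorted((v for v in y if v > 8), reverse=True)
--     sy = sorted((v for v in y if v < 6), reverse=True)
--
--     def variants(items, s):
--         if not items:
--             return [[]] if s == 0 else []
--         (v, cnt), rest = items[0], items[1:]
--         out = []
--         for d in (-2, -1, 0, 1, 2):
--             if cnt + d >= 0:
--                 for tail in variants(rest, s + d):
--                     out.append(tail + [v] * (cnt + d))
--         return out
--
--     mids = variants([(6, y.count(6)), (7, y.count(7)), (8, y.count(8))], 0)
--     return [ny + m + sy for m in mids]
-- ===== Notes on version B (the rewrite author's own statement) =====
-- stated objective: alternative
-- what changed: B replaces A's counting dict and the product(nums, repeat=3)+sum==0 generate-and-filter over 125 triples by a recursive offset distributor over (value, count) pairs whose base case enforces the zero-sum constraint, with ny/sy obtained by sorting the filtered input directly.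
import Mathlib
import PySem

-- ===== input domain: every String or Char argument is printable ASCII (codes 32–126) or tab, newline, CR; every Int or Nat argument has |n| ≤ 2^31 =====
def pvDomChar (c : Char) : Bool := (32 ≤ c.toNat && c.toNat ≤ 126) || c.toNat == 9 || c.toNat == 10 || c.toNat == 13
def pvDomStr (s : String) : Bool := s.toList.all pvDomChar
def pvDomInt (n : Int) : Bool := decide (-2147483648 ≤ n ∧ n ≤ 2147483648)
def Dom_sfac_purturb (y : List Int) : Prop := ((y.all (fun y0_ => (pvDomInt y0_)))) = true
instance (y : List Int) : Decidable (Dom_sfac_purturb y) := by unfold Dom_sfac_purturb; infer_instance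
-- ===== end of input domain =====

-- B drops the counting dict and the product(repeat=3)+sum filter: ny/sy come from sorting the
-- filtered input, and the middle segments are built by a recursive offset distributor (objective: alternative).

-- ===== PORT A =====
-- sfac[k] on the known-present keys 6/7/8 (and on iterated keys) is ported as getD k 0 (exact: KeyError unreachable).
def sfacA (y : List Int) : PySem.Dict Int Int :=
  y.foldl (fun d item =>
      let d := if d.contains item then d else d.insert item 0
      d.modify item 0 (fun v => v + 1))
    ((((PySem.Dict.empty : PySem.Dict Int Int).insert 6 0).insert 7 0).insert 8 0)

def sfac_purturb (y : List Int) : List (List Int) :=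
  let sfac := sfacA y
  let nysy := (PySem.List.sorted sfac.keys (fun k => k) true).foldl
      (fun (p : List Int × List Int) k =>
        (if 8 < k then p.1 ++ PySem.List.pyRepeat [k] (sfac.getD k 0) else p.1,
         if k < 6 then p.2 ++ PySem.List.pyRepeat [k] (sfac.getD k 0) else p.2)) ([], [])
  let ny := nysy.1
  let sy := nysy.2
  let nums : List Int := [-2, -1, 0, 1, 2]
  let perms := nums.flatMap (fun a => nums.flatMap (fun b => nums.map (fun c => (a, b, c))))
  perms.foldl (fun all_y perm =>
      let ky : List Int := []
      if perm.1 + perm.2.1 + perm.2.2 = 0 then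
        let c := perm.1 + sfac.getD 6 0
        let n := perm.2.1 + sfac.getD 7 0
        let o := perm.2.2 + sfac.getD 8 0
        if -1 < c ∧ -1 < n ∧ -1 < o then
          let ky := ky ++ PySem.List.pyRepeat [8] o
          let ky := ky ++ PySem.List.pyRepeat [7] n
          let ky := ky ++ PySem.List.pyRepeat [6] c
          all_y ++ [ny ++ ky ++ sy]
        else all_y
      else all_y) []

-- ===== PORT B =====
-- recursive offset distributor: at each (value, count) pair choose an offset d ∈ [-2..2],
-- keep the branch only if the count stays non-negative; the base case keeps only offset-sum 0.
def variantsB : List (Int × Int) → Int → List (List Int)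
  | [], s => if s = 0 then [[]] else []
  | (v, cnt) :: rest, s =>
    ([-2, -1, 0, 1, 2] : List Int).foldl (fun out d =>
      if 0 ≤ cnt + d then
        out ++ (variantsB rest (s + d)).map (fun tail => tail ++ PySem.List.pyRepeat [v] (cnt + d))
      else out) []

def sfac_purturb_alt (y : List Int) : List (List Int) :=
  let ny := PySem.List.sorted (y.filter (fun v => 8 < v)) (fun x => x) true
  let sy := PySem.List.sorted (y.filter (fun v => v < 6)) (fun x => x) true
  let mids := variantsB [(6, PySem.List.count y 6), (7, PySem.List.count y 7), (8, PySem.List.count y 8)] 0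
  mids.map (fun m => ny ++ m ++ sy)

-- ===== PRECONDITION & SPEC =====
def Spec_sfac_purturb (y : List Int) (out : List (List Int)) : Prop := out = sfac_purturb_alt y
instance (y : List Int) (out : List (List Int)) : Decidable (Spec_sfac_purturb y out) := by unfold Spec_sfac_purturb; infer_instance

-- ===== CLAIM =====
def Claim_equal_sfac_purturb : Prop := ∀ (y : List Int), Dom_sfac_purturb y → Spec_sfac_purturb y (sfac_purturb y)

-- ===== LEMMAS AND PROOFS =====

lemma ins_mod (d : PySem.Dict Int Int) (k : Int) :
    ((if d.contains k then d else d.insert k 0).modify k 0 (fun v => v + 1))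
      = d.modify k 0 (fun v => v + 1) := by
  by_cases h : d.contains k = true
  · simp [h]
  · have h' : d.contains k = false := by simpa using h
    simp only [h', Bool.false_eq_true, if_false]
    simp [PySem.Dict.modify, PySem.Dict.getD_insert_self, PySem.Dict.insert_insert_self,
      PySem.Dict.getD_of_not_contains d 0 h']

lemma sfacA_eq (y : List Int) :
    sfacA y = y.foldl (fun d x => d.modify x 0 (fun v => v + 1))
      ((((PySem.Dict.empty : PySem.Dict Int Int).insert 6 0).insert 7 0).insert 8 0) := by
  unfold sfacA
  exact PySem.List.foldl_congr_mem _ _ _ _ (fun acc x _ => ins_mod acc x)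

lemma sfacA_getD (y : List Int) (v : Int) :
    (sfacA y).getD v 0 = ((List.count v y : Nat) : Int) := by
  rw [sfacA_eq, PySem.Dict.getD_foldl_modify_add_one]
  have h0 : ((((PySem.Dict.empty : PySem.Dict Int Int).insert 6 0).insert 7 0).insert 8 0).getD v 0 = 0 := by
    simp only [PySem.Dict.getD_insert, PySem.Dict.getD_empty]
    split_ifs <;> rfl
  rw [h0, zero_add]

lemma sfacA_keys (y : List Int) :
    (sfacA y).keys = PySem.Set.update [6, 7, 8] y := by
  rw [sfacA_eq,
    PySem.Dict.keys_foldl_modify_key y (fun x => x) 0 (fun _ _ v => v + 1)]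
  have h1 : ((((PySem.Dict.empty : PySem.Dict Int Int).insert 6 0).insert 7 0).insert 8 0).keys
      = [6, 7, 8] := by decide
  rw [h1, List.map_id']

lemma pairwise_flatMap_replicate (l : List Int) (n : Int → Nat)
    (h : l.Pairwise (fun a b => b ≤ a)) :
    (l.flatMap (fun k => List.replicate (n k) k)).Pairwise (fun a b => b ≤ a) := by
  induction l with
  | nil => simp
  | cons k t ih =>
    rw [List.pairwise_cons] at h
    simp only [List.flatMap_cons]
    rw [List.pairwise_append]
    refine ⟨List.pairwise_replicate.2 (Or.inr le_rfl), ih h.2, ?_⟩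
    intro a ha b hb
    obtain ⟨k', hk', hb'⟩ := List.mem_flatMap.1 hb
    rw [List.eq_of_mem_replicate ha, List.eq_of_mem_replicate hb']
    exact h.1 k' hk'

lemma count_flatMap_replicate (l : List Int) (n : Int → Nat) (hnd : l.Nodup) (v : Int) :
    List.count v (l.flatMap (fun k => List.replicate (n k) k)) = if v ∈ l then n v else 0 := by
  induction l with
  | nil => simp
  | cons k t ih =>
    obtain ⟨hk, ht⟩ := List.nodup_cons.1 hnd
    simp only [List.flatMap_cons, List.count_append, List.count_replicate, ih ht,
      List.mem_cons, beq_iff_eq]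
    by_cases hv : v = k
    · subst hv
      simp [hk]
    · simp [hv, Ne.symm hv]

lemma sorted_rev_id_eq (xs ys : List Int) (hperm : ys.Perm xs)
    (hpw : ys.Pairwise (fun a b => b ≤ a)) :
    PySem.List.sorted xs (fun x => x) true = ys := by
  apply List.eq_of_perm_of_sorted (le := fun a b : Int => b ≤ a)
  · intro a b _ _ h1 h2
    exact le_antisymm h2 h1
  · exact PySem.List.sorted_pairwise_rev xs (fun x => x)
  · exact hpw
  · exact (PySem.List.sorted_perm xs _ true).trans hperm.symm

-- the grouped-by-count build over the sorted distinct keys equals sorting the filtered input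
lemma side_eq (y : List Int) (p : Int → Bool) :
    ((PySem.List.sorted (PySem.Set.update [6, 7, 8] y) (fun k => k) true).filter p).flatMap
        (fun k => List.replicate (List.count k y) k)
      = PySem.List.sorted (y.filter p) (fun x => x) true := by
  refine (sorted_rev_id_eq (y.filter p) _ ?_ ?_).symm
  · rw [List.perm_iff_count]
    intro v
    have hndK : (PySem.Set.update ([6, 7, 8] : List Int) y).Nodup :=
      PySem.Set.nodup_update _ y (by decide)
    have hndS : (PySem.List.sorted (PySem.Set.update [6, 7, 8] y) (fun k => k) true).Nodup :=
      ((PySem.List.sorted_perm _ _ true).nodup_iff).2 hndK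
    rw [count_flatMap_replicate _ _ (hndS.filter p) v]
    by_cases hpv : p v = true
    · rw [List.count_filter hpv]
      by_cases hvy : v ∈ y
      · have hmem : v ∈ List.filter p
            (PySem.List.sorted (PySem.Set.update [6, 7, 8] y) (fun k => k) true) := by
          rw [List.mem_filter]
          exact ⟨((PySem.List.sorted_perm _ _ true).mem_iff).2
            ((PySem.Set.mem_update _ _ _).2 (Or.inr hvy)), hpv⟩
        simp [hmem]
      · simp [List.count_eq_zero.2 hvy]
    · have h1 : v ∉ List.filter p
          (PySem.List.sorted (PySem.Set.update [6, 7, 8] y) (fun k => k) true) :=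
        fun hm => hpv (List.mem_filter.1 hm).2
      have h2 : v ∉ List.filter p y := fun hm => hpv (List.mem_filter.1 hm).2
      simp [h1, List.count_eq_zero.2 h2]
  · exact pairwise_flatMap_replicate _ _ ((PySem.List.sorted_pairwise_rev _ _).filter p)

lemma ny_eq (y : List Int) :
    List.foldl (fun acc k => if 8 < k then acc ++ List.replicate (List.count k y) k else acc) []
      (PySem.List.sorted (PySem.Set.update [6, 7, 8] y) (fun k => k) true)
    = PySem.List.sorted (y.filter (fun v => decide (8 < v))) (fun x => x) true := by
  rw [PySem.List.foldl_ite_eq_foldl_filter (p := fun k => (8 : Int) < k),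
    PySem.List.foldl_append_eq_flatMap, List.nil_append]
  exact side_eq y (fun k => decide (8 < k))

lemma sy_eq (y : List Int) :
    List.foldl (fun acc k => if k < 6 then acc ++ List.replicate (List.count k y) k else acc) []
      (PySem.List.sorted (PySem.Set.update [6, 7, 8] y) (fun k => k) true)
    = PySem.List.sorted (y.filter (fun v => decide (v < 6))) (fun x => x) true := by
  rw [PySem.List.foldl_ite_eq_foldl_filter (p := fun k => k < (6 : Int)),
    PySem.List.foldl_append_eq_flatMap, List.nil_append]
  exact side_eq y (fun k => decide (k < 6))

lemma foldl_flatMap_eq {α β γ : Type} (g : α → List β) (f : γ → β → γ) (l : List α)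
    (init : γ) : (l.flatMap g).foldl f init = l.foldl (fun acc a => (g a).foldl f acc) init := by
  induction l generalizing init with
  | nil => rfl
  | cons x t ih => simp [List.flatMap_cons, List.foldl_append, ih]

-- foldl that conditionally appends = flatMap of conditional singletons
lemma foldl_ite_append_eq_flatMap {α β : Type} (l : List α) (p : α → Prop)
    [DecidablePred p] (g : α → List β) (init : List β) :
    l.foldl (fun out x => if p x then out ++ g x else out) init
      = init ++ l.flatMap (fun x => if p x then g x else []) := by
  induction l generalizing init with
  | nil => simp
  | cons x t ih =>
    simp only [List.foldl_cons, List.flatMap_cons]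
    by_cases h : p x
    · simp [h, ih, List.append_assoc]
    · simp [h, ih]

-- closed form of the deepest level of the distributor
lemma variantsB_one (c8 s : Int) :
    variantsB [(8, c8)] s
      = if -2 ≤ s ∧ s ≤ 2 ∧ 0 ≤ c8 + -s then [List.replicate (c8 + -s).toNat 8] else [] := by
  have hsplit : s = -2 ∨ s = -1 ∨ s = 0 ∨ s = 1 ∨ s = 2 ∨ (s < -2 ∨ 2 < s) := by omega
  rcases hsplit with h | h | h | h | h | h <;>
    first
    | (subst h
       simp only [variantsB, List.foldl_cons, List.foldl_nil]
       norm_num [PySem.List.pyRepeat_singleton, ite_self])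
    | (have g1 : ¬(s + -2 = 0) := by omega
       have g2 : ¬(s + -1 = 0) := by omega
       have g3 : ¬(s + 0 = 0) := by omega
       have g4 : ¬(s + 1 = 0) := by omega
       have g5 : ¬(s + 2 = 0) := by omega
       have g6 : ¬(-2 ≤ s ∧ s ≤ 2 ∧ 0 ≤ c8 + -s) := by omega
       simp only [variantsB, List.foldl_cons, List.foldl_nil,
         if_neg g1, if_neg g2, if_neg g3, if_neg g4, if_neg g5, if_neg g6]
       norm_num [ite_self])

-- per-(a,b) collapse of A's innermost loop over the third component
lemma inner_eq (ny sy : List Int) (c6 c7 c8 : Int) (a b : Int) (acc : List (List Int)) :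
    List.foldl (fun all_y (c : Int) =>
        if a + b + c = 0 then
          if -1 < a + c6 ∧ -1 < b + c7 ∧ -1 < c + c8 then
            all_y ++ [ny ++ ((List.replicate (c + c8).toNat 8 ++
              List.replicate (b + c7).toNat 7) ++
              List.replicate (a + c6).toNat 6) ++ sy]
          else all_y
        else all_y) acc [-2, -1, 0, 1, 2]
    = acc ++ (if -2 ≤ a + b ∧ a + b ≤ 2 then
        if 0 ≤ c6 + a ∧ 0 ≤ c7 + b ∧ 0 ≤ c8 + -(a + b) then
          [ny ++ List.replicate (c8 + -(a + b)).toNat 8 ++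
            List.replicate (c7 + b).toNat 7 ++
            List.replicate (c6 + a).toNat 6 ++ sy]
        else []
      else []) := by
  have hlt : ∀ x : Int, (-1 < x) ↔ (0 ≤ x) := fun x => by omega
  have hsplit : a + b = -2 ∨ a + b = -1 ∨ a + b = 0 ∨ a + b = 1 ∨ a + b = 2 ∨
      (a + b < -2 ∨ 2 < a + b) := by omega
  simp only [List.foldl_cons, List.foldl_nil]
  rcases hsplit with h | h | h | h | h | h
  · simp only [h]
    norm_num [hlt, Int.add_comm _ c6, Int.add_comm _ c7, Int.add_comm _ c8, List.append_assoc]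
    split_ifs <;> simp
  · simp only [h]
    norm_num [hlt, Int.add_comm _ c6, Int.add_comm _ c7, Int.add_comm _ c8, List.append_assoc]
    split_ifs <;> simp
  · simp only [h]
    norm_num [hlt, Int.add_comm _ c6, Int.add_comm _ c7, Int.add_comm _ c8, List.append_assoc]
    split_ifs <;> simp
  · simp only [h]
    norm_num [hlt, Int.add_comm _ c6, Int.add_comm _ c7, Int.add_comm _ c8, List.append_assoc]
    split_ifs <;> simp
  · simp only [h]
    norm_num [hlt, Int.add_comm _ c6, Int.add_comm _ c7, Int.add_comm _ c8, List.append_assoc]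
    split_ifs <;> simp
  · have g1 : ¬(a + b + -2 = 0) := by omega
    have g2 : ¬(a + b + -1 = 0) := by omega
    have g3 : ¬(a + b + 0 = 0) := by omega
    have g4 : ¬(a + b + 1 = 0) := by omega
    have g5 : ¬(a + b + 2 = 0) := by omega
    have g6 : ¬(-2 ≤ a + b ∧ a + b ≤ 2) := by omega
    simp only [if_neg g1, if_neg g2, if_neg g3, if_neg g4, if_neg g5, if_neg g6,
      List.append_nil]

-- both sides reduce to the same double flatMap over the two free offsets
lemma loops_eq (ny sy : List Int) (c6 c7 c8 : Int) :
    (([-2, -1, 0, 1, 2] : List Int).flatMap (fun a => ([-2, -1, 0, 1, 2] : List Int).flatMap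
        (fun b => ([-2, -1, 0, 1, 2] : List Int).map (fun c => (a, b, c))))).foldl
      (fun all_y (perm : Int × Int × Int) =>
        if perm.1 + perm.2.1 + perm.2.2 = 0 then
          if -1 < perm.1 + c6 ∧ -1 < perm.2.1 + c7 ∧ -1 < perm.2.2 + c8 then
            all_y ++ [ny ++ ((List.replicate (perm.2.2 + c8).toNat 8 ++
              List.replicate (perm.2.1 + c7).toNat 7) ++
              List.replicate (perm.1 + c6).toNat 6) ++ sy]
          else all_y
        else all_y) []
    = (variantsB [(6, c6), (7, c7), (8, c8)] 0).map (fun m => ny ++ m ++ sy) := by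
  -- A side → double flatMap of conditional singletons
  have hA : (([-2, -1, 0, 1, 2] : List Int).flatMap (fun a => ([-2, -1, 0, 1, 2] : List Int).flatMap
        (fun b => ([-2, -1, 0, 1, 2] : List Int).map (fun c => (a, b, c))))).foldl
      (fun all_y (perm : Int × Int × Int) =>
        if perm.1 + perm.2.1 + perm.2.2 = 0 then
          if -1 < perm.1 + c6 ∧ -1 < perm.2.1 + c7 ∧ -1 < perm.2.2 + c8 then
            all_y ++ [ny ++ ((List.replicate (perm.2.2 + c8).toNat 8 ++
              List.replicate (perm.2.1 + c7).toNat 7) ++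
              List.replicate (perm.1 + c6).toNat 6) ++ sy]
          else all_y
        else all_y) []
      = ([-2, -1, 0, 1, 2] : List Int).flatMap (fun a =>
          ([-2, -1, 0, 1, 2] : List Int).flatMap (fun b =>
            if -2 ≤ a + b ∧ a + b ≤ 2 then
              if 0 ≤ c6 + a ∧ 0 ≤ c7 + b ∧ 0 ≤ c8 + -(a + b) then
                [ny ++ List.replicate (c8 + -(a + b)).toNat 8 ++
                  List.replicate (c7 + b).toNat 7 ++
                  List.replicate (c6 + a).toNat 6 ++ sy]
              else []
            else [])) := by
    rw [foldl_flatMap_eq]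
    have hstep : ∀ (acc : List (List Int)) (a : Int),
        (([-2, -1, 0, 1, 2] : List Int).flatMap
            (fun b => ([-2, -1, 0, 1, 2] : List Int).map (fun c => (a, b, c)))).foldl
          (fun all_y (perm : Int × Int × Int) =>
            if perm.1 + perm.2.1 + perm.2.2 = 0 then
              if -1 < perm.1 + c6 ∧ -1 < perm.2.1 + c7 ∧ -1 < perm.2.2 + c8 then
                all_y ++ [ny ++ ((List.replicate (perm.2.2 + c8).toNat 8 ++
                  List.replicate (perm.2.1 + c7).toNat 7) ++
                  List.replicate (perm.1 + c6).toNat 6) ++ sy]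
              else all_y
            else all_y) acc
        = acc ++ ([-2, -1, 0, 1, 2] : List Int).flatMap (fun b =>
            if -2 ≤ a + b ∧ a + b ≤ 2 then
              if 0 ≤ c6 + a ∧ 0 ≤ c7 + b ∧ 0 ≤ c8 + -(a + b) then
                [ny ++ List.replicate (c8 + -(a + b)).toNat 8 ++
                  List.replicate (c7 + b).toNat 7 ++
                  List.replicate (c6 + a).toNat 6 ++ sy]
              else []
            else []) := by
      intro acc a
      rw [foldl_flatMap_eq]
      simp only [List.foldl_map]
      have hinner : ∀ (acc2 : List (List Int)) (b : Int),
          List.foldl (fun all_y (c : Int) =>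
            if a + b + c = 0 then
              if -1 < a + c6 ∧ -1 < b + c7 ∧ -1 < c + c8 then
                all_y ++ [ny ++ ((List.replicate (c + c8).toNat 8 ++
                  List.replicate (b + c7).toNat 7) ++
                  List.replicate (a + c6).toNat 6) ++ sy]
              else all_y
            else all_y) acc2 [-2, -1, 0, 1, 2]
          = acc2 ++ (if -2 ≤ a + b ∧ a + b ≤ 2 then
              if 0 ≤ c6 + a ∧ 0 ≤ c7 + b ∧ 0 ≤ c8 + -(a + b) then
                [ny ++ List.replicate (c8 + -(a + b)).toNat 8 ++
                  List.replicate (c7 + b).toNat 7 ++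
                  List.replicate (c6 + a).toNat 6 ++ sy]
              else []
            else []) := fun acc2 b => inner_eq ny sy c6 c7 c8 a b acc2
      refine (PySem.List.foldl_congr_mem _ _ _ _ (fun acc2 b _ => hinner acc2 b)).trans ?_
      rw [PySem.List.foldl_append_eq_flatMap]
    refine (PySem.List.foldl_congr_mem _ _ _ _ (fun acc a _ => hstep acc a)).trans ?_
    rw [PySem.List.foldl_append_eq_flatMap, List.nil_append]
  rw [hA]
  -- B side → the same double flatMap
  show _ = (variantsB ((6, c6) :: [(7, c7), (8, c8)]) 0).map (fun m => ny ++ m ++ sy)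
  rw [show variantsB ((6, c6) :: [(7, c7), (8, c8)]) 0
      = ([-2, -1, 0, 1, 2] : List Int).foldl (fun out d =>
          if 0 ≤ c6 + d then
            out ++ (variantsB [(7, c7), (8, c8)] (0 + d)).map
              (fun tail => tail ++ PySem.List.pyRepeat [6] (c6 + d))
          else out) [] from rfl]
  rw [foldl_ite_append_eq_flatMap, List.nil_append, List.map_flatMap]
  refine List.flatMap_congr ?_
  intro a _
  rw [show variantsB ((7, c7) :: [(8, c8)]) (0 + a)
      = ([-2, -1, 0, 1, 2] : List Int).foldl (fun out d =>
          if 0 ≤ c7 + d then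
            out ++ (variantsB [(8, c8)] (0 + a + d)).map
              (fun tail => tail ++ PySem.List.pyRepeat [7] (c7 + d))
          else out) [] from rfl]
  rw [foldl_ite_append_eq_flatMap, List.nil_append]
  by_cases h6 : 0 ≤ c6 + a
  · simp only [if_pos h6, List.map_flatMap]
    refine List.flatMap_congr ?_
    intro b _
    rw [variantsB_one]
    have he2 : (0 : Int) + a + b = a + b := by ring
    rw [he2]
    split_ifs with h1 h2 h3 h4 <;>
      first
        | (exfalso; omega)
        | simp [PySem.List.pyRepeat_singleton, List.append_assoc]
  · simp only [if_neg h6, List.map_nil]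
    refine List.flatMap_eq_nil_iff.2 ?_
    intro b _
    split_ifs with hx hy
    · exact absurd hy.1 h6
    · rfl
    · rfl

-- ===== VERDICT (by name: the statement is the Claim_ definition above) =====
theorem sfac_purturb_spec : Claim_equal_sfac_purturb := by
  intro y _
  unfold Spec_sfac_purturb
  unfold sfac_purturb sfac_purturb_alt
  simp only [sfacA_getD, sfacA_keys, PySem.List.count_eq, PySem.List.pyRepeat_singleton,
    Int.toNat_natCast, List.nil_append]
  rw [PySem.List.foldl_prod_mk
    (f := fun acc k => if 8 < k then acc ++ List.replicate (List.count k y) k else acc)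
    (g := fun acc k => if k < 6 then acc ++ List.replicate (List.count k y) k else acc)]
  dsimp only
  simp only [ny_eq, sy_eq]
  exact loops_eq _ _ _ _ _
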